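-- pv_equiv track=rewrite | github.com/tjschroeder23/comp110-22s-workspace | exercises/ex08/data_utils.py | slice_count
-- ===== SOURCE A (Python) =====
-- def count(a: list[str]) -> dict[str, int]:
--     result: dict[str, int] = dict()
--     for item in a:
--         if item in result:
--             result[item] += 1
--         else:
--             result[item] = 1
--     return result
--
-- def choice_order(a: list[str], b: dict[str, int]) -> dict[str, int]:
--     result: dict[str, int] = dict()
--     for item in a:
--         result[item] = 0
--     for key in b:
--         result[key] = b[key]
--     return result
--
-- def slice_count(a: list[str], b: list[str], c: list[str], d: list[str]) -> dict[str, dict[str, int]]: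
--     result: dict[str, dict[str, int]] = dict()
--     tempdict: dict[str, list[str]] = dict()
--     for slice in a:
--         tempdict[slice] = []
--         i: int = 0
--         while i < len(c):
--             if c[i] == slice:
--                 tempdict[slice].append(d[i])
--             i += 1
--         result[slice] = choice_order(b, count(tempdict[slice]))
--     return result
-- ===== SOURCE B (Python) =====
-- def slice_count(a: list[str], b: list[str], c: list[str], d: list[str]) -> dict[str, dict[str, int]]:
--     # One grouping pass over zip(c, d) into per-slice counters, instead of rescanning c for every slice.
--     buckets: dict[str, dict[str, int]] = {}
--     for s in a:
--         buckets[s] = {}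
--     for ci, di in zip(c, d):
--         bucket = buckets.get(ci)
--         if bucket is not None:
--             bucket[di] = bucket.get(di, 0) + 1
--     result: dict[str, dict[str, int]] = {}
--     for s in a:
--         inner: dict[str, int] = {}
--         for x in b:
--             inner[x] = 0
--         for k, v in buckets[s].items():
--             inner[k] = v
--         result[s] = inner
--     return result
-- ===== Notes on version B (the rewrite author's own statement) =====
-- stated objective: faster
-- what changed: A rescans all of c (and indexes d) once per slice in a; B makes a single grouping pass over zip(c, d) into per-slice counter dicts and then assembles each slice's choice-order dict from b and its counter, removing the inner scan.
import Mathlib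
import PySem

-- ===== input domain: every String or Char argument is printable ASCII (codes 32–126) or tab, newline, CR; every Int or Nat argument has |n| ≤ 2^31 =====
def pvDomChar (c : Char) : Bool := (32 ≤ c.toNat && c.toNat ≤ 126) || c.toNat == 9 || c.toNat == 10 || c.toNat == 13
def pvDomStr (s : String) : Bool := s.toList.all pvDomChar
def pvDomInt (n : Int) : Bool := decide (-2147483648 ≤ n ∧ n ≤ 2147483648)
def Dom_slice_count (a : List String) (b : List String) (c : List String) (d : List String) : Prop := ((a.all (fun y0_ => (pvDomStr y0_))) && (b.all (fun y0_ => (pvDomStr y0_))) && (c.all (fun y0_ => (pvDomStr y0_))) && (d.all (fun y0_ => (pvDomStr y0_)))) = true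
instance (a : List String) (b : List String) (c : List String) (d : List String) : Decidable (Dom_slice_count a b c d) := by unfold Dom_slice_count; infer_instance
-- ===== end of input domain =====

-- B replaces A's per-slice rescan of c with one grouping pass over zip(c, d) into per-slice
-- counter dicts (objective: faster).
-- ===== PORT A =====

-- port of A's helper `count`
def pvCountA (l : List String) : PySem.Dict String Int :=
  l.foldl (fun r item =>
    if r.contains item then r.insert item (r.getD item 0 + 1)
    else r.insert item 1) PySem.Dict.empty

-- port of A's helper `choice_order`; `b[key]` is ported as `b.getD key 0`, exact because
-- `key` ranges over `b.keys` so the lookup always succeeds in Python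
def pvChoiceOrderA (a : List String) (b : PySem.Dict String Int) : PySem.Dict String Int :=
  let r := a.foldl (fun r item => r.insert item 0) PySem.Dict.empty
  b.keys.foldl (fun r key => r.insert key (b.getD key 0)) r

-- the `while i < len(c)` loop of A's slice iteration; `c[i]`/`d[i]` via pyGet?:
-- the `none` branches are where Python raises IndexError (the `d` one is excluded by
-- Pre_slice_count; the `c` one is unreachable since i < len(c))
def pvWhileA (c : List String) (d : List String) (sl : String)
    (td : PySem.Dict String (List String)) : PySem.Dict String (List String) :=
  (PySem.List.pyRange 0 (c.length : Int)).foldl (fun td i =>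
    match PySem.List.pyGet? c i with
    | some x =>
        if x == sl then
          match PySem.List.pyGet? d i with
          | some v => td.insert sl (td.getD sl [] ++ [v])
          | none => td
        else td
    | none => td) td

def slice_count (a : List String) (b : List String) (c : List String) (d : List String) : List (String × List (String × Int)) :=
  let st := a.foldl (fun (st : PySem.Dict String (PySem.Dict String Int) × PySem.Dict String (List String)) sl =>
      let td := st.2.insert sl []
      let td := pvWhileA c d sl td
      (st.1.insert sl (pvChoiceOrderA b (pvCountA (td.getD sl []))), td))
    (PySem.Dict.empty, PySem.Dict.empty)
  st.1.items.map (fun p => (p.1, p.2.items))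

-- ===== PORT B =====

-- the single grouping pass of Source B: per-slice counter buckets over zip(c, d)
def pvBucketsB (a : List String) (c : List String) (d : List String) : PySem.Dict String (PySem.Dict String Int) :=
  let t := a.foldl (fun t s => t.insert s PySem.Dict.empty) PySem.Dict.empty
  (c.zip d).foldl (fun t q =>
    match t.get? q.1 with
    | some m => t.insert q.1 (m.insert q.2 (m.getD q.2 0 + 1))
    | none => t) t

-- Source B's inner-dict assembly: zeros for b, then overwrite with the bucket's items
def pvInnerB (b : List String) (m : PySem.Dict String Int) : PySem.Dict String Int :=
  let inner := b.foldl (fun r x => r.insert x 0) PySem.Dict.empty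
  m.items.foldl (fun r p => r.insert p.1 p.2) inner

def slice_count_alt (a : List String) (b : List String) (c : List String) (d : List String) : List (String × List (String × Int)) :=
  let t := pvBucketsB a c d
  let res := a.foldl (fun (r : PySem.Dict String (PySem.Dict String Int)) s =>
      r.insert s (pvInnerB b (t.getD s PySem.Dict.empty))) PySem.Dict.empty
  res.items.map (fun p => (p.1, p.2.items))

-- ===== PRECONDITION & SPEC =====
-- A raises IndexError on d[i] exactly when some index i < len(c) with c[i] ∈ a has i ≥ len(d);
-- Pre_ excludes exactly those inputs (A returns normally everywhere else).
def Pre_slice_count (a : List String) (b : List String) (c : List String) (d : List String) : Prop :=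
  ∀ i : Nat, i < c.length → c.getD i "" ∈ a → i < d.length
instance (a : List String) (b : List String) (c : List String) (d : List String) : Decidable (Pre_slice_count a b c d) := by unfold Pre_slice_count; infer_instance

def pvWitness_slice_count : List String × List String × List String × List String :=
  (["s", "t"], ["p", "q"], ["s", "u", "s"], ["q", "p", "q"])

def Spec_slice_count (a : List String) (b : List String) (c : List String) (d : List String) (out : List (String × List (String × Int))) : Prop := out = slice_count_alt a b c d
instance (a : List String) (b : List String) (c : List String) (d : List String) (out : List (String × List (String × Int))) : Decidable (Spec_slice_count a b c d out) := by unfold Spec_slice_count; infer_instance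

-- ===== CLAIM (what is proved, stated in full; the proofs are below) =====
def Claim_equal_slice_count : Prop := ∀ (a : List String) (b : List String) (c : List String) (d : List String), Dom_slice_count a b c d → Pre_slice_count a b c d → Spec_slice_count a b c d (slice_count a b c d)

-- ===== LEMMAS AND PROOFS =====

-- the d-values matched to slice s, as B's zip pass sees them
def pvMatches (c : List String) (d : List String) (s : String) : List String :=
  ((c.zip d).filter (fun q => q.1 == s)).map Prod.snd

-- the common counting step
def pvCStep (m : PySem.Dict String Int) (x : String) : PySem.Dict String Int :=
  m.insert x (m.getD x 0 + 1)

lemma pvCountA_eq (l : List String) :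
    pvCountA l = l.foldl pvCStep PySem.Dict.empty := by
  unfold pvCountA
  refine PySem.List.foldl_congr_mem' l _ _ _ ?_
  intro x _ r
  by_cases h : r.contains x = true
  · simp [h, pvCStep]
  · simp only [Bool.not_eq_true] at h
    simp [h, pvCStep, PySem.Dict.getD_of_not_contains r 0 h]

-- A's while loop collects exactly the matched d-values, for s ∈ a under Pre_
lemma pvWhileA_getD (a cs ds : List String) (s : String)
    (hpre : Pre_slice_count a b' cs ds) (hs : s ∈ a) :
    ∀ n : Nat, n ≤ cs.length → ∀ td : PySem.Dict String (List String),
      (((PySem.List.pyRange 0 (n : Int)).foldl (fun td i =>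
        match PySem.List.pyGet? cs i with
        | some x =>
            if x == s then
              match PySem.List.pyGet? ds i with
              | some v => td.insert s (td.getD s [] ++ [v])
              | none => td
            else td
        | none => td) td).getD s []) =
      td.getD s [] ++ (((cs.zip ds).take n).filter (fun q => q.1 == s)).map Prod.snd := by
  intro n
  induction n with
  | zero =>
      intro _ td
      simp
  | succ n ih =>
      intro hn td
      have hcast : ((n+1 : Nat) : Int) = (n : Int) + 1 := by push_cast; ring
      rw [hcast, PySem.List.pyRange_one_succ_right (by positivity), List.foldl_append]
      simp only [List.foldl_cons, List.foldl_nil]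
      have hn' : n < cs.length := by omega
      rw [PySem.List.pyGet?_natCast cs n, List.getElem?_eq_getElem hn']
      rw [List.take_add_one]
      by_cases hx : cs[n] = s
      · have hsn : cs.getD n "" ∈ a := by
          rw [List.getD_eq_getElem cs "" hn', hx]; exact hs
        have hd : n < ds.length := hpre n hn' hsn
        have hz : (cs.zip ds)[n]? = some (cs[n], ds[n]) := by
          rw [List.getElem?_eq_getElem (by simp [List.length_zip]; omega)]
          simp [List.getElem_zip]
        rw [PySem.List.pyGet?_natCast ds n, List.getElem?_eq_getElem hd]
        simp only [hx, beq_self_eq_true, if_true]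
        rw [PySem.Dict.getD_insert_self, ih (by omega) td, hz]
        simp [List.filter_append, hx]
      · have hxb : (cs[n] == s) = false := by simp [hx]
        simp only [hxb, Bool.false_eq_true, if_false]
        rw [ih (by omega) td]
        cases hz : (cs.zip ds)[n]? with
        | none => simp
        | some q =>
            have hq : q.1 = cs[n] := by
              have := List.getElem?_eq_some_iff.1 hz
              obtain ⟨h1, h2⟩ := this
              rw [← h2]; simp [List.getElem_zip]
            have : (q.1 == s) = false := by simp [hq, hx]
            simp [List.filter_append, this]

-- the bucket fold, looked up at one key
lemma pvBucketFold_get? (l : List (String × String)) :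
    ∀ (t : PySem.Dict String (PySem.Dict String Int)) (s : String),
      ((l.foldl (fun t q =>
        match t.get? q.1 with
        | some m => t.insert q.1 (m.insert q.2 (m.getD q.2 0 + 1))
        | none => t) t).get? s) =
      (t.get? s).map (fun m => ((l.filter (fun q => q.1 == s)).map Prod.snd).foldl pvCStep m) := by
  induction l with
  | nil => intro t s; cases ht : t.get? s <;> simp [ht]
  | cons q l ih =>
      intro t s
      simp only [List.foldl_cons]
      cases hq : t.get? q.1 with
      | none =>
          rw [ih t s]
          by_cases hqs : q.1 = s
          · rw [← hqs, hq]; simp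
          · have : (q.1 == s) = false := by simp [hqs]
            simp [this]
      | some m =>
          rw [ih _ s]
          by_cases hqs : s = q.1
          · rw [PySem.Dict.get?_insert, if_pos hqs, hqs, hq]
            have : (q.1 == q.1) = true := by simp
            simp [pvCStep]
          · rw [PySem.Dict.get?_insert, if_neg hqs]
            have : (q.1 == s) = false := beq_eq_false_iff_ne.2 (fun h => hqs h.symm)
            simp [this]

lemma pvInit_get? (a : List String) (s : String) :
    ∀ t : PySem.Dict String (PySem.Dict String Int),
      ((a.foldl (fun t s => t.insert s PySem.Dict.empty) t).get? s) =
      if s ∈ a then some PySem.Dict.empty else t.get? s := by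
  induction a with
  | nil => intro t; simp
  | cons x a ih =>
      intro t
      simp only [List.foldl_cons]
      rw [ih]
      by_cases hsa : s ∈ a
      · simp [hsa]
      · rw [PySem.Dict.get?_insert]
        by_cases hsx : s = x
        · simp [hsx]
        · simp [hsx]

lemma pvChoice_eq_inner (b : List String) (m : PySem.Dict String Int)
    (hm : m.keys.Nodup) : pvChoiceOrderA b m = pvInnerB b m := by
  unfold pvChoiceOrderA pvInnerB
  rw [PySem.Dict.items_eq_map_keys m hm 0, List.foldl_map]


lemma pvA_outer (a b cs ds : List String) (hpre : Pre_slice_count a b cs ds) :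
    ∀ (l : List String), (∀ s ∈ l, s ∈ a) →
    ∀ st : PySem.Dict String (PySem.Dict String Int) × PySem.Dict String (List String),
      (l.foldl (fun st sl =>
        let td := st.2.insert sl []
        let td := pvWhileA cs ds sl td
        (st.1.insert sl (pvChoiceOrderA b (pvCountA (td.getD sl []))), td)) st).1
      = l.foldl (fun r sl => r.insert sl (pvChoiceOrderA b (pvCountA (pvMatches cs ds sl)))) st.1 := by
  intro l
  induction l with
  | nil => intro _ st; rfl
  | cons sl l ih =>
      intro hl st
      simp only [List.foldl_cons]
      rw [ih (fun s hs => hl s (List.mem_cons_of_mem sl hs))]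
      have hv : (pvWhileA cs ds sl (st.2.insert sl [])).getD sl [] = pvMatches cs ds sl := by
        unfold pvWhileA
        rw [pvWhileA_getD (b' := b) a cs ds sl hpre (hl sl List.mem_cons_self) cs.length le_rfl]
        rw [PySem.Dict.getD_insert_self]
        rw [List.take_of_length_le (by rw [List.length_zip]; omega)]
        rfl
      rw [hv]

lemma pvBuckets_getD (a cs ds : List String) (s : String) (hs : s ∈ a) :
    (pvBucketsB a cs ds).getD s PySem.Dict.empty
      = (pvMatches cs ds s).foldl pvCStep PySem.Dict.empty := by
  unfold pvBucketsB
  apply PySem.Dict.getD_of_get?_eq_some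
  rw [pvBucketFold_get?, pvInit_get?]
  simp [hs, pvMatches]

lemma pvCnt_nodup (l : List String) :
    (l.foldl pvCStep PySem.Dict.empty).keys.Nodup :=
  PySem.Dict.nodup_keys_foldl_insert l (fun m x => m.getD x 0 + 1) PySem.Dict.empty
    PySem.Dict.nodup_keys_empty

-- ===== VERDICT (by name: the statement is the Claim_ definition above) =====
theorem slice_count_spec : Claim_equal_slice_count := by
  unfold Claim_equal_slice_count
  intro a b c d _ hpre
  unfold Spec_slice_count slice_count slice_count_alt
  show List.map (fun p => (p.1, p.2.items))
      ((List.foldl (fun (st : PySem.Dict String (PySem.Dict String Int) × PySem.Dict String (List String)) sl =>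
        let td := st.2.insert sl []
        let td := pvWhileA c d sl td
        (st.1.insert sl (pvChoiceOrderA b (pvCountA (td.getD sl []))), td))
        (PySem.Dict.empty, PySem.Dict.empty) a).1).items
    = List.map (fun p => (p.1, p.2.items))
      ((List.foldl (fun (r : PySem.Dict String (PySem.Dict String Int)) s =>
        r.insert s (pvInnerB b ((pvBucketsB a c d).getD s PySem.Dict.empty))) PySem.Dict.empty a).items)
  have hA := pvA_outer a b c d hpre a (fun _ hs => hs) (PySem.Dict.empty, PySem.Dict.empty)
  rw [hA]
  have hB : (a.foldl (fun (r : PySem.Dict String (PySem.Dict String Int)) s =>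
      r.insert s (pvInnerB b ((pvBucketsB a c d).getD s PySem.Dict.empty))) PySem.Dict.empty)
      = a.foldl (fun r sl => r.insert sl (pvChoiceOrderA b (pvCountA (pvMatches c d sl)))) PySem.Dict.empty := by
    refine PySem.List.foldl_congr_mem' a _ _ _ ?_
    intro s hs r
    rw [pvBuckets_getD a c d s hs, ← pvChoice_eq_inner b _ (pvCnt_nodup _), pvCountA_eq]
  rw [hB]
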